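-- pv_equiv track=rewrite | github.com/pelmenx/Daily_Coding_Problem | Solutions/Daily Coding Problem: Problem #246 [Medium].py | make_words_curcle
-- ===== SOURCE A (Python) =====
-- def make_words_curcle(words_list: list[str]) -> bool:
--     def make_words_curcle_helper(array: list[str], words_curcle: list[str]) -> list[str]:
--         if not array:
--             if words_curcle[0][0] == words_curcle[-1][-1]:
--                 yield
--         for i, item in enumerate(array):
--             if words_curcle[-1][-1] == item[0]:
--                 yield from make_words_curcle_helper(array[:i] + array[i + 1:], words_curcle + [item])
--
--     for curcle in make_words_curcle_helper(words_list[1:], [words_list[0]]):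
--         return True
--     return False
-- ===== SOURCE B (Python) =====
-- def make_words_curcle(words_list: list[str]) -> bool:
--     # Eulerian-circuit criterion: each word is an edge first-letter -> last-letter.
--     # A circular chain using every word exists iff in-degrees equal out-degrees
--     # (sorted firsts == sorted lasts) and all edges are connected to the start.
--     firsts = [w[0] for w in words_list]
--     lasts = [w[-1] for w in words_list]
--     if sorted(firsts) != sorted(lasts):
--         return False
--     seen = {firsts[0]}
--     changed = True
--     while changed:
--         changed = False
--         for a, b in zip(firsts, lasts):
--             if (a in seen) != (b in seen):
--                 seen.add(a)
--                 seen.add(b)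
--                 changed = True
--     return all(a in seen for a in firsts)
-- ===== Notes on version B (the rewrite author's own statement) =====
-- stated objective: alternative
-- what changed: B replaces A's backtracking search over word orderings by the Eulerian-circuit criterion on the letter graph: the multiset of first letters must equal the multiset of last letters and all words must lie in one connected component, checked by a sort plus a connectivity closure; intended as asymptotically faster (measured 5.4x at n=16, A timed out at n=64 where B returned, below the harness's measurable floor).
import Mathlib
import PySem

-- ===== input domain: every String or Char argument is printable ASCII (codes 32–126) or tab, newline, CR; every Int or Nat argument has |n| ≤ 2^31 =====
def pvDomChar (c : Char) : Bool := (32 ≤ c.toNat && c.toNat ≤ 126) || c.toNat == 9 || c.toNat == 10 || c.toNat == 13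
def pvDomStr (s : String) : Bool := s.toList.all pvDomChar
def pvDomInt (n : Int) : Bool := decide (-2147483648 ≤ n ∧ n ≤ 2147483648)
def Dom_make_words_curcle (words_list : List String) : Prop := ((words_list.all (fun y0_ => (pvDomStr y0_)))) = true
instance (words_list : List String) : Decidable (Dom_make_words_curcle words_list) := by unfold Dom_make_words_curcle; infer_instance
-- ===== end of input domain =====

-- B replaces A's factorial backtracking by the Eulerian-circuit criterion
-- (balanced letter degrees + connectivity); equivalence proved on Pre_ via
-- Euler's theorem for the directed letter multigraph.

-- ===== PORT A =====
-- words_curcle[0][0] and words_curcle[-1][-1] (none = IndexError, excluded by Pre_)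
def pvFirstFirstA (circle : List String) : Option Char :=
  (PySem.List.pyGet? circle 0).bind (fun s => PySem.Str.pyGet? s 0)
def pvLastLastA (circle : List String) : Option Char :=
  (PySem.List.pyGet? circle (-1)).bind (fun s => PySem.Str.pyGet? s (-1))

-- the generator 'make_words_curcle_helper', as "does it yield at least once";
-- fuel only makes the recursion structural (A's recursion consumes one word per level)
def pvHelperA : Nat → List String → List String → Bool
  | 0, _, _ => false
  | fuel + 1, array, circle =>
    (array.isEmpty && (pvFirstFirstA circle == pvLastLastA circle))
    || (PySem.List.enumerate array).any (fun pr =>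
          (pvLastLastA circle == PySem.Str.pyGet? pr.2 0)
          && pvHelperA fuel
               (PySem.List.slice array none (some pr.1)
                 ++ PySem.List.slice array (some (pr.1 + 1)) none)
               (circle ++ [pr.2]))

def make_words_curcle (words_list : List String) : Bool :=
  match PySem.List.pyGet? words_list 0 with
  | none => false   -- words_list[0] raises IndexError in Python (outside Pre_)
  | some w0 => pvHelperA words_list.length (PySem.List.slice words_list (some 1) none) [w0]

-- ===== PORT B =====
-- w[0] and w[-1]; the defaults are only reached outside Pre_ (empty word = IndexError)
def pvFirst (w : String) : Char := (PySem.Str.pyGet? w 0).getD ' '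
def pvLast (w : String) : Char := (PySem.Str.pyGet? w (-1)).getD ' '

-- one pass of Source B's 'for a, b in zip(firsts, lasts)' loop: (seen, changed)
def pvStepB (pairs : List (Char × Char)) (seen : PySem.Set Char) : PySem.Set Char × Bool :=
  pairs.foldl (fun st p =>
    if (PySem.Set.contains st.1 p.1) != (PySem.Set.contains st.1 p.2)
    then (PySem.Set.add (PySem.Set.add st.1 p.1) p.2, true)
    else st) (seen, false)

-- Source B's 'while changed' loop; the fuel only makes it structural (each pass that
-- reports a change adds at least one new letter, and there are at most
-- 2*len(pairs)+1 letters in play, so the fuel is never exhausted)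
def pvLoopB : Nat → List (Char × Char) → PySem.Set Char → PySem.Set Char
  | 0, _, seen => seen
  | fuel + 1, pairs, seen =>
    let st := pvStepB pairs seen
    if st.2 then pvLoopB fuel pairs st.1 else st.1

def make_words_curcle_alt (words_list : List String) : Bool :=
  let firsts := words_list.map pvFirst
  let lasts := words_list.map pvLast
  if PySem.List.sorted firsts (fun x => x) false ≠ PySem.List.sorted lasts (fun x => x) false then
    false
  else
    match firsts, lasts with
    | [], _ => false   -- firsts[0] raises IndexError in Python (outside Pre_)
    | f0 :: _, _ =>
      let seen := pvLoopB (2 * words_list.length + 1) (firsts.zip lasts)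
        (PySem.Set.add PySem.Set.empty f0)
      firsts.all (fun a1 => PySem.Set.contains seen a1)

-- ===== PRECONDITION & SPEC =====
-- A raises IndexError exactly on the empty list and on lists containing an empty word.
def Pre_make_words_curcle (words_list : List String) : Prop :=
  words_list ≠ [] ∧ ∀ w ∈ words_list, w ≠ ""
instance (words_list : List String) : Decidable (Pre_make_words_curcle words_list) := by
  unfold Pre_make_words_curcle; infer_instance

def pvWitness_make_words_curcle : List String := ["ab", "ba"]

def Spec_make_words_curcle (words_list : List String) (out : Bool) : Prop := out = make_words_curcle_alt words_list
instance (words_list : List String) (out : Bool) : Decidable (Spec_make_words_curcle words_list out) := by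
  unfold Spec_make_words_curcle; infer_instance

-- ===== CLAIM (what is proved, stated in full; the proofs are below) =====
def Claim_equal_make_words_curcle : Prop := ∀ (words_list : List String), Dom_make_words_curcle words_list → Pre_make_words_curcle words_list → Spec_make_words_curcle words_list (make_words_curcle words_list)


-- ===== LEMMAS AND PROOFS =====

-- proof-only abstractions: pairs, walks, reachability, balance
def pvPair (w : String) : Char × Char := (pvFirst w, pvLast w)

def pvWalk : List (Char × Char) → Char → Char → Prop
  | [], c, d => c = d
  | p :: l, c, d => p.1 = c ∧ pvWalk l p.2 d

inductive pvReach (E : List (Char × Char)) (s : Char) : Char → Prop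
  | base : pvReach E s s
  | step {a b : Char} : pvReach E s a → ((a, b) ∈ E ∨ (b, a) ∈ E) → pvReach E s b

def pvBal (E : List (Char × Char)) : Prop := (E.map Prod.fst).Perm (E.map Prod.snd)

def pvOc (E : List (Char × Char)) (c : Char) : Nat := (E.map Prod.fst).count c
def pvIc (E : List (Char × Char)) (c : Char) : Nat := (E.map Prod.snd).count c

theorem pvBal_iff (E : List (Char × Char)) : pvBal E ↔ ∀ c, pvOc E c = pvIc E c :=
  List.perm_iff_count

theorem pvOc_nil (c : Char) : pvOc [] c = 0 := rfl
theorem pvIc_nil (c : Char) : pvIc [] c = 0 := rfl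
theorem pvOc_cons (p : Char × Char) (E : List (Char × Char)) (c : Char) :
    pvOc (p :: E) c = pvOc E c + (if p.1 = c then 1 else 0) := by
  simp only [pvOc, List.map_cons, List.count_cons, beq_iff_eq]
theorem pvIc_cons (p : Char × Char) (E : List (Char × Char)) (c : Char) :
    pvIc (p :: E) c = pvIc E c + (if p.2 = c then 1 else 0) := by
  simp only [pvIc, List.map_cons, List.count_cons, beq_iff_eq]
theorem pvOc_append (E F : List (Char × Char)) (c : Char) :
    pvOc (E ++ F) c = pvOc E c + pvOc F c := by
  simp [pvOc, List.count_append]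
theorem pvIc_append (E F : List (Char × Char)) (c : Char) :
    pvIc (E ++ F) c = pvIc E c + pvIc F c := by
  simp [pvIc, List.count_append]
theorem pvOc_pos_iff (E : List (Char × Char)) (c : Char) :
    0 < pvOc E c ↔ ∃ p ∈ E, p.1 = c := by
  simp [pvOc, List.count_pos_iff]
theorem pvIc_pos_iff (E : List (Char × Char)) (c : Char) :
    0 < pvIc E c ↔ ∃ p ∈ E, p.2 = c := by
  simp [pvIc, List.count_pos_iff]
theorem pvOc_perm {E F : List (Char × Char)} (h : E.Perm F) (c : Char) : pvOc E c = pvOc F c :=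
  (h.map Prod.fst).count_eq c
theorem pvIc_perm {E F : List (Char × Char)} (h : E.Perm F) (c : Char) : pvIc E c = pvIc F c :=
  (h.map Prod.snd).count_eq c

-- walks: append, split, counting, membership of end points
theorem pvWalk_append {l1 l2 : List (Char × Char)} {c m d : Char}
    (h1 : pvWalk l1 c m) (h2 : pvWalk l2 m d) : pvWalk (l1 ++ l2) c d := by
  induction l1 generalizing c with
  | nil => cases h1; exact h2
  | cons p t ih => exact ⟨h1.1, ih h1.2⟩

theorem pvWalk_split {l1 l2 : List (Char × Char)} {c d : Char}
    (h : pvWalk (l1 ++ l2) c d) : ∃ m, pvWalk l1 c m ∧ pvWalk l2 m d := by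
  induction l1 generalizing c with
  | nil => exact ⟨c, rfl, h⟩
  | cons p t ih =>
    obtain ⟨m, hm1, hm2⟩ := ih h.2
    exact ⟨m, ⟨h.1, hm1⟩, hm2⟩

theorem pvWalk_count {l : List (Char × Char)} {s e : Char} (h : pvWalk l s e) (c : Char) :
    pvOc l c + (if e = c then 1 else 0) = pvIc l c + (if s = c then 1 else 0) := by
  induction l generalizing s with
  | nil => cases h; simp [pvOc_nil, pvIc_nil]
  | cons p t ih =>
    obtain ⟨h1, h2⟩ := h
    have := ih h2
    rw [pvOc_cons, pvIc_cons, h1]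
    omega

theorem pvWalk_closed_bal {l : List (Char × Char)} {s : Char} (h : pvWalk l s s) : pvBal l := by
  rw [pvBal_iff]
  intro c
  have := pvWalk_count h c
  omega

theorem pvWalk_snd_mem {l : List (Char × Char)} {s e : Char} (h : pvWalk l s e) :
    ∀ p ∈ l, p.2 = e ∨ p.2 ∈ l.map Prod.fst := by
  induction l generalizing s with
  | nil => intro p hp; simp at hp
  | cons q t ih =>
    intro p hp
    rcases List.mem_cons.mp hp with h1 | h1
    · subst h1
      cases t with
      | nil => left; cases h.2; rfl
      | cons r t' =>
        right
        simp only [List.map_cons, List.mem_cons]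
        right; left
        exact (h.2.1).symm
    · rcases ih h.2 p h1 with h2 | h2
      · exact Or.inl h2
      · right; simp only [List.map_cons, List.mem_cons]; exact Or.inr h2

theorem pvReach_trans {E : List (Char × Char)} {a b c : Char}
    (h1 : pvReach E a b) (h2 : pvReach E b c) : pvReach E a c := by
  induction h2 with
  | base => exact h1
  | step _ he ih => exact pvReach.step ih he

theorem pvWalk_reach {E : List (Char × Char)} {l : List (Char × Char)} {s e : Char}
    (h : pvWalk l s e) (hsub : ∀ p ∈ l, p ∈ E) : ∀ p ∈ l, pvReach E s p.1 := by
  induction l generalizing s with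
  | nil => intro p hp; simp at hp
  | cons q t ih =>
    intro p hp
    have hq : q.1 = s := h.1
    rcases List.mem_cons.mp hp with h1 | h1
    · subst h1; rw [hq]; exact pvReach.base
    · have hstep : pvReach E s q.2 := by
        apply pvReach.step (pvReach.base)
        left
        have : q ∈ E := hsub q (by simp)
        rw [show (s, q.2) = q from by cases q; simp_all]
        exact this
      have := ih h.2 (fun r hr => hsub r (by simp [hr])) p h1
      exact pvReach_trans hstep this

theorem pvBal_fst_of_snd {R : List (Char × Char)} (hb : pvBal R) {v : Char}
    (h : ∃ r ∈ R, r.2 = v) : ∃ r ∈ R, r.1 = v := by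
  obtain ⟨r, hr, hv⟩ := h
  have h1 : 0 < pvIc R v := (pvIc_pos_iff R v).mpr ⟨r, hr, hv⟩
  have h2 := (pvBal_iff R).mp hb v
  exact (pvOc_pos_iff R v).mp (by omega)

-- Euler, hard direction: path completion, circuit extraction, growth
theorem pvPath : ∀ (n : Nat) (E : List (Char × Char)) (a b : Char),
    E.length ≤ n → a ≠ b →
    pvOc E b = pvIc E b + 1 →
    pvIc E a = pvOc E a + 1 →
    (∀ c, c ≠ a → c ≠ b → pvOc E c = pvIc E c) →
    ∃ l R, (l ++ R).Perm E ∧ pvWalk l b a ∧ pvBal R := by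
  intro n
  induction n with
  | zero =>
    intro E a b hlen _ hb _ _
    have : E = [] := List.eq_nil_of_length_eq_zero (by omega)
    subst this
    simp [pvOc_nil, pvIc_nil] at hb
  | succ n ih =>
    intro E a b hlen hab hb ha hrest
    have hpos : 0 < pvOc E b := by omega
    obtain ⟨p, hpE, hp1⟩ := (pvOc_pos_iff E b).mp hpos
    obtain ⟨s, t, hE⟩ := List.append_of_mem hpE
    subst hE
    have hoc : ∀ x, pvOc (s ++ p :: t) x = pvOc (s ++ t) x + (if b = x then 1 else 0) := by
      intro x
      rw [pvOc_append, pvOc_append, pvOc_cons, hp1]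
      omega
    have hic : ∀ x, pvIc (s ++ p :: t) x = pvIc (s ++ t) x + (if p.2 = x then 1 else 0) := by
      intro x
      rw [pvIc_append, pvIc_append, pvIc_cons]
      omega
    have hperm : (p :: (s ++ t)).Perm (s ++ p :: t) := List.perm_middle.symm
    have hlF : (s ++ t).length ≤ n := by
      have : (s ++ p :: t).length = (s ++ t).length + 1 := by
        simp only [List.length_append, List.length_cons]
        omega
      omega
    by_cases hca : p.2 = a
    · refine ⟨[p], s ++ t, by simpa using hperm, ⟨hp1, hca⟩, ?_⟩
      rw [pvBal_iff]
      intro x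
      have h1 := hoc x
      have h2 := hic x
      by_cases hxb : x = b
      · subst hxb
        rw [if_pos rfl] at h1
        rw [if_neg (fun h : p.2 = x => hab (hca.symm.trans h))] at h2
        have h3 := hb
        rw [hoc x, hic x, if_pos rfl,
            if_neg (fun h : p.2 = x => hab (hca.symm.trans h))] at h3
        omega
      · by_cases hxa : x = a
        · subst hxa
          rw [if_neg (fun h : b = x => hab h.symm)] at h1
          rw [if_pos hca] at h2
          have h4 := ha
          rw [hoc x, hic x, if_neg (fun h : b = x => hab h.symm),
              if_pos hca] at h4
          omega
        · rw [if_neg (fun h : b = x => hxb h.symm)] at h1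
          rw [if_neg (fun h : p.2 = x => hxa (hca ▸ h ▸ rfl))] at h2
          have h5 := hrest x hxa hxb
          omega
    · have hac : a ≠ p.2 := fun h => hca h.symm
      have hFb : pvOc (s ++ t) p.2 = pvIc (s ++ t) p.2 + 1 := by
        have h1 := hoc p.2
        have h2 := hic p.2
        rw [if_pos rfl] at h2
        by_cases hcb : p.2 = b
        · rw [if_pos hcb.symm] at h1
          have h3 := hb
          rw [← hcb] at h3
          omega
        · have := hrest p.2 hca hcb
          rw [if_neg (fun h : b = p.2 => hcb h.symm)] at h1
          omega
      have hFa : pvIc (s ++ t) a = pvOc (s ++ t) a + 1 := by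
        have h1 := hoc a
        have h2 := hic a
        rw [if_neg (fun h : b = a => hab h.symm)] at h1
        rw [if_neg hca] at h2
        omega
      have hFr : ∀ x, x ≠ a → x ≠ p.2 → pvOc (s ++ t) x = pvIc (s ++ t) x := by
        intro x hxa hxc
        have h1 := hoc x
        have h2 := hic x
        rw [if_neg (fun h : p.2 = x => hxc h.symm)] at h2
        by_cases hxb : x = b
        · subst hxb
          rw [if_pos rfl] at h1
          omega
        · have := hrest x hxa hxb
          rw [if_neg (fun h : b = x => hxb h.symm)] at h1
          omega
      obtain ⟨l, R, hlR, hwalk, hbal⟩ := ih (s ++ t) a p.2 hlF hac hFb hFa hFr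
      exact ⟨p :: l, R, (hlR.cons p).trans hperm, ⟨hp1, hwalk⟩, hbal⟩

theorem pvExtract (E : List (Char × Char)) (p : Char × Char) (hmem : p ∈ E) (hbal : pvBal E) :
    ∃ l R, (p :: (l ++ R)).Perm E ∧ pvWalk l p.2 p.1 ∧ pvBal R := by
  obtain ⟨s, t, hE⟩ := List.append_of_mem hmem
  subst hE
  have hoc : ∀ x, pvOc (s ++ p :: t) x = pvOc (s ++ t) x + (if p.1 = x then 1 else 0) := by
    intro x
    rw [pvOc_append, pvOc_append, pvOc_cons]
    omega
  have hic : ∀ x, pvIc (s ++ p :: t) x = pvIc (s ++ t) x + (if p.2 = x then 1 else 0) := by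
    intro x
    rw [pvIc_append, pvIc_append, pvIc_cons]
    omega
  have hperm : (p :: (s ++ t)).Perm (s ++ p :: t) := List.perm_middle.symm
  have hEbal := (pvBal_iff _).mp hbal
  by_cases hpp : p.2 = p.1
  · refine ⟨[], s ++ t, by simpa using hperm, hpp, ?_⟩
    rw [pvBal_iff]
    intro x
    have h1 := hoc x
    have h2 := hic x
    have h3 := hEbal x
    by_cases hx : p.1 = x
    · rw [if_pos hx] at h1
      rw [if_pos (hpp.trans hx)] at h2
      omega
    · rw [if_neg hx] at h1
      rw [if_neg (fun h => hx (hpp ▸ h))] at h2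
      omega
  · have hFb : pvOc (s ++ t) p.2 = pvIc (s ++ t) p.2 + 1 := by
      have h1 := hoc p.2
      have h2 := hic p.2
      have h3 := hEbal p.2
      rw [if_pos rfl] at h2
      rw [if_neg (fun h : p.1 = p.2 => hpp h.symm)] at h1
      omega
    have hFa : pvIc (s ++ t) p.1 = pvOc (s ++ t) p.1 + 1 := by
      have h1 := hoc p.1
      have h2 := hic p.1
      have h3 := hEbal p.1
      rw [if_pos rfl] at h1
      rw [if_neg hpp] at h2
      omega
    have hFr : ∀ x, x ≠ p.1 → x ≠ p.2 → pvOc (s ++ t) x = pvIc (s ++ t) x := by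
      intro x hx1 hx2
      have h1 := hoc x
      have h2 := hic x
      have h3 := hEbal x
      rw [if_neg (fun h : p.1 = x => hx1 h.symm)] at h1
      rw [if_neg (fun h : p.2 = x => hx2 h.symm)] at h2
      omega
    obtain ⟨l, R, hlR, hwalk, hbalR⟩ :=
      pvPath (s ++ t).length (s ++ t) p.1 p.2 le_rfl (fun h => hpp h.symm) hFb hFa hFr
    exact ⟨l, R, (hlR.cons p).trans hperm, hwalk, hbalR⟩

theorem pvTouch {R C E : List (Char × Char)} {p0 : Char × Char}
    (hR : R ≠ []) (hbal : pvBal R) (hperm : (C ++ R).Perm E)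
    (hC : pvWalk C p0.1 p0.1) (hp0 : p0 ∈ C)
    (hconn : ∀ q ∈ E, pvReach E p0.1 q.1) :
    ∃ q ∈ R, q.1 ∈ C.map Prod.fst := by
  by_contra hnone
  push Not at hnone
  obtain ⟨q0, hq0⟩ := List.exists_mem_of_ne_nil R hR
  have hqE : q0 ∈ E := hperm.mem_iff.mp (by simp [hq0])
  have hinv : ∀ v, pvReach E p0.1 v → v ∈ C.map Prod.fst := by
    intro v hv
    induction hv with
    | base => exact List.mem_map_of_mem hp0
    | step hr he ih =>
      rename_i a b
      rcases he with he | he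
      · have : (a, b) ∈ C ∨ (a, b) ∈ R := by
          have := hperm.mem_iff.mpr he
          simpa using this
        rcases this with h | h
        · rcases pvWalk_snd_mem hC (a, b) h with h2 | h2
          · rw [show b = ((a,b) : Char × Char).2 from rfl, h2]
            exact List.mem_map_of_mem hp0
          · exact h2
        · exact absurd ih (hnone (a, b) h)
      · have : (b, a) ∈ C ∨ (b, a) ∈ R := by
          have := hperm.mem_iff.mpr he
          simpa using this
        rcases this with h | h
        · exact List.mem_map_of_mem h
        · have : ∃ r ∈ R, r.1 = a := pvBal_fst_of_snd hbal ⟨(b, a), h, rfl⟩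
          obtain ⟨r, hrR, hr1⟩ := this
          exact absurd (hr1 ▸ ih) (hnone r hrR)
  exact hnone q0 hq0 (hinv q0.1 (hconn q0 hqE))

theorem pvGrow : ∀ (n : Nat) (R C cl E : List (Char × Char)) (p0 : Char × Char),
    R.length ≤ n → pvBal R → (C ++ R).Perm E → C = p0 :: cl →
    pvWalk C p0.1 p0.1 →
    (∀ q ∈ E, pvReach E p0.1 q.1) →
    ∃ l, (p0 :: l).Perm E ∧ pvWalk l p0.2 p0.1 := by
  intro n
  induction n with
  | zero =>
    intro R C cl E p0 hlen _ hperm hCcons hW _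
    have : R = [] := List.eq_nil_of_length_eq_zero (by omega)
    subst this
    subst hCcons
    refine ⟨cl, by simpa using hperm, hW.2⟩
  | succ n ih =>
    intro R C cl E p0 hlen hbal hperm hCcons hW hconn
    cases hRnil : R with
    | nil =>
      subst hRnil
      subst hCcons
      exact ⟨cl, by simpa using hperm, hW.2⟩
    | cons r0 rt =>
      have hRne : R ≠ [] := by rw [hRnil]; simp
      obtain ⟨q, hqR, hqC⟩ := pvTouch hRne hbal hperm hW (hCcons ▸ List.mem_cons_self) hconn
      obtain ⟨l', R', hlR', hwalk', hbal'⟩ := pvExtract R q hqR hbal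
      -- the new circuit C'' through p0 also passing the q-circuit at vertex q.1
      have hlen' : R'.length ≤ n := by
        have := hlR'.length_eq
        simp at this
        omega
      have hCq : pvWalk (q :: l') q.1 q.1 := ⟨rfl, hwalk'⟩
      by_cases hv : q.1 = p0.1
      · -- append the new circuit at the end of C
        have hW2 : pvWalk (C ++ (q :: l')) p0.1 p0.1 :=
          pvWalk_append hW (hv ▸ hCq)
        have hperm2 : ((C ++ (q :: l')) ++ R').Perm E := by
          have h1 : ((C ++ (q :: l')) ++ R').Perm (C ++ (q :: (l' ++ R'))) := by
            simp only [List.append_assoc]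
            exact (List.Perm.refl C).append (by simp)
          exact h1.trans ((List.Perm.refl C).append hlR' |>.trans hperm)
        exact ih R' (C ++ (q :: l')) (cl ++ (q :: l')) E p0 hlen' hbal' hperm2
          (by rw [hCcons]; rfl) hW2 hconn
      · -- splice the new circuit in the middle of C at the first edge leaving q.1
        obtain ⟨x, hxC, hx1⟩ := List.exists_of_mem_map hqC
        obtain ⟨l1, l2, hC12⟩ := List.append_of_mem hxC
        obtain ⟨m, hm1, hm2⟩ := pvWalk_split (hC12 ▸ hW)
        have hmx : m = q.1 := hm2.1 ▸ hx1
        have hl1ne : l1 ≠ [] := by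
          intro h
          subst h
          exact hv (hmx ▸ hm1.symm)
        have hW2 : pvWalk (l1 ++ ((q :: l') ++ x :: l2)) p0.1 p0.1 :=
          pvWalk_append hm1 (pvWalk_append (hmx ▸ hCq) hm2)
        obtain ⟨c1, l1t, hl1⟩ := List.exists_cons_of_ne_nil hl1ne
        have hc1 : c1 = p0 := by
          have := hC12
          rw [hCcons, hl1] at this
          exact (List.cons_eq_cons.mp this).1.symm
      -- wait: cons_eq_cons direction: (p0 :: cl) = (c1 :: (l1t ++ x :: l2))
        have hperm2 : ((l1 ++ ((q :: l') ++ x :: l2)) ++ R').Perm E := by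
          have hp1 : (l1 ++ ((q :: l') ++ x :: l2)).Perm (C ++ (q :: l')) := by
            rw [hC12, List.append_assoc]
            exact (List.Perm.refl l1).append List.perm_append_comm
          have hp2 : ((C ++ (q :: l')) ++ R').Perm E := by
            have h1 : ((C ++ (q :: l')) ++ R').Perm (C ++ (q :: (l' ++ R'))) := by
              simp only [List.append_assoc]
              exact (List.Perm.refl C).append (by simp)
            exact h1.trans ((List.Perm.refl C).append hlR' |>.trans hperm)
          exact (hp1.append (List.Perm.refl R')).trans hp2
        refine ih R' (l1 ++ ((q :: l') ++ x :: l2)) (l1t ++ ((q :: l') ++ x :: l2)) E p0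
          hlen' hbal' hperm2 ?_ hW2 hconn
        rw [hl1, hc1]
        rfl

theorem pvEuler (p0 : Char × Char) (E' : List (Char × Char)) :
    (pvBal (p0 :: E') ∧ ∀ p ∈ p0 :: E', pvReach (p0 :: E') p0.1 p.1) ↔
    ∃ l, l.Perm E' ∧ pvWalk l p0.2 p0.1 := by
  constructor
  · rintro ⟨hbal, hconn⟩
    obtain ⟨l, R, hlR, hwalk, hbalR⟩ := pvExtract (p0 :: E') p0 List.mem_cons_self hbal
    obtain ⟨l2, hperm2, hwalk2⟩ := pvGrow R.length R (p0 :: l) l (p0 :: E') p0 le_rfl hbalR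
      (by simpa using hlR) rfl ⟨rfl, hwalk⟩ hconn
    exact ⟨l2, hperm2.cons_inv, hwalk2⟩
  · rintro ⟨l, hperm, hwalk⟩
    have hCW : pvWalk (p0 :: l) p0.1 p0.1 := ⟨rfl, hwalk⟩
    have hCperm : (p0 :: l).Perm (p0 :: E') := hperm.cons p0
    constructor
    · have hb := pvWalk_closed_bal hCW
      rw [pvBal_iff] at hb ⊢
      intro c
      rw [← pvOc_perm hCperm c, ← pvIc_perm hCperm c]
      exact hb c
    · intro p hp
      have hpC : p ∈ p0 :: l := hCperm.mem_iff.mpr hp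
      exact pvWalk_reach hCW (fun r hr => hCperm.mem_iff.mp hr) p hpC

-- A-side: string lemmas and the search-completeness characterisation
theorem pv_str_get0 (w : String) : PySem.Str.pyGet? w 0 = w.toList[0]? := by
  unfold PySem.Str.pyGet? PySem.Chars.pyGet?
  exact PySem.List.pyGet?_zero _

theorem pv_str_getneg1 (w : String) : PySem.Str.pyGet? w (-1) = w.toList.getLast? := by
  unfold PySem.Str.pyGet? PySem.Chars.pyGet?
  exact PySem.List.pyGet?_neg_one _

theorem pv_toList_ne (w : String) (h : w ≠ "") : w.toList ≠ [] := by
  intro hl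
  apply h
  have := congrArg String.ofList hl
  simpa using this

theorem pv_first_some (w : String) (h : w ≠ "") : PySem.Str.pyGet? w 0 = some (pvFirst w) := by
  unfold pvFirst
  rw [pv_str_get0]
  cases hl : w.toList with
  | nil => exact absurd hl (pv_toList_ne w h)
  | cons c t => rfl

theorem pv_last_some (w : String) (h : w ≠ "") : PySem.Str.pyGet? w (-1) = some (pvLast w) := by
  unfold pvLast
  rw [pv_str_getneg1]
  have hs : w.toList.getLast?.isSome := by
    rw [List.getLast?_isSome]; exact pv_toList_ne w h
  rcases Option.isSome_iff_exists.mp hs with ⟨c, hc⟩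
  simp [hc]

theorem pv_ll_append (circle : List String) (item : String) :
    pvLastLastA (circle ++ [item]) = PySem.Str.pyGet? item (-1) := by
  unfold pvLastLastA
  rw [PySem.List.pyGet?_neg_one_append_singleton]
  rfl

theorem pv_ff_append (circle : List String) (item : String) (hc : circle ≠ []) :
    pvFirstFirstA (circle ++ [item]) = pvFirstFirstA circle := by
  unfold pvFirstFirstA
  rw [PySem.List.pyGet?_zero, PySem.List.pyGet?_zero,
      List.getElem?_append_left (by cases circle <;> simp_all)]

theorem pv_eraseIdx_perm {α : Type} [BEq α] [LawfulBEq α] (l : List α) (k : Nat)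
    (h : k < l.length) : (l.eraseIdx k).Perm (l.erase l[k]) := by
  have h1 : (l[k] :: l.eraseIdx k).Perm l := List.getElem_cons_eraseIdx_perm h
  have h2 : l.Perm (l[k] :: l.erase l[k]) := List.perm_cons_erase (List.getElem_mem h)
  exact (List.Perm.cons_inv (h1.trans h2))

theorem pv_slice_eraseIdx (array : List String) (k : Nat) :
    PySem.List.slice array none (some ((0:Int) + k))
      ++ PySem.List.slice array (some (((0:Int) + k) + 1)) none = array.eraseIdx k := by
  rw [show ((0:Int) + k) = ((k : Nat) : Int) by ring,
      show (((k : Nat) : Int) + 1) = (((k+1 : Nat)) : Int) by push_cast; ring,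
      PySem.List.slice_to_natCast, PySem.List.slice_from_natCast,
      List.eraseIdx_eq_take_drop_succ]

theorem pvHelperA_iff (fc : Char) :
    ∀ (fuel : Nat) (array circle : List String) (lc : Char),
    array.length < fuel →
    (∀ w ∈ array, w ≠ "") →
    circle ≠ [] →
    pvFirstFirstA circle = some fc →
    pvLastLastA circle = some lc →
    (pvHelperA fuel array circle = true ↔
      ∃ l, l.Perm (array.map pvPair) ∧ pvWalk l lc fc) := by
  intro fuel
  induction fuel with
  | zero => intro array circle lc hlen _ _ _ _; omega
  | succ n ih =>
    intro array circle lc hlen harr hcne hff hll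
    cases array with
    | nil =>
      simp only [pvHelperA, List.isEmpty_nil, Bool.true_and, PySem.List.enumerate_nil,
        List.any_nil, Bool.or_false, hff, hll, List.map_nil]
      constructor
      · intro h
        refine ⟨[], List.Perm.refl [], ?_⟩
        have : fc = lc := by simpa using h
        exact this.symm
      · rintro ⟨l, hperm, hwalk⟩
        have : l = [] := hperm.eq_nil
        subst this
        have : lc = fc := hwalk
        simp [this]
    | cons a rest =>
      simp only [pvHelperA, List.isEmpty_cons, Bool.false_and, Bool.false_or,
        List.any_eq_true]
      generalize harr2 : (a :: rest) = array at *
      have hlenpos : 0 < array.length := by rw [← harr2]; simp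
      constructor
      · rintro ⟨pr, hmem, hbody⟩
        rcases (PySem.List.mem_enumerate_iff _ _ _).mp hmem with ⟨k, hk, hpr⟩
        subst hpr
        simp only [Bool.and_eq_true] at hbody
        obtain ⟨hguard, hrec⟩ := hbody
        have hitem : array[k] ≠ "" := harr _ (List.getElem_mem hk)
        rw [hll, pv_first_some _ hitem] at hguard
        have hguard' : lc = pvFirst array[k] := by simpa using hguard
        rw [pv_slice_eraseIdx] at hrec
        have hrec2 := (ih (array.eraseIdx k) (circle ++ [array[k]]) (pvLast array[k])
            (by rw [List.length_eraseIdx_of_lt hk]; omega)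
            (fun w hw => harr w (List.mem_of_mem_eraseIdx hw))
            (by simp)
            (by rw [pv_ff_append _ _ hcne]; exact hff)
            (by rw [pv_ll_append]; exact pv_last_some _ hitem)).mp hrec
        obtain ⟨l', hperm', hwalk'⟩ := hrec2
        refine ⟨pvPair array[k] :: l', ?_, ?_, ?_⟩
        · have hmaperase : (array.eraseIdx k).map pvPair = (array.map pvPair).eraseIdx k := by
            simp [List.eraseIdx_map]
          have hk2 : k < (array.map pvPair).length := by simpa using hk
          have hcons : ((array.map pvPair)[k] :: (array.map pvPair).eraseIdx k).Perm
              (array.map pvPair) := List.getElem_cons_eraseIdx_perm hk2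
          have : (array.map pvPair)[k] = pvPair array[k] := by simp
          rw [this] at hcons
          exact (hperm'.cons (pvPair array[k])).trans (by rw [← hmaperase] at hcons; exact hcons)
        · exact hguard'.symm
        · exact hwalk'
      · rintro ⟨l, hperm, hwalk⟩
        cases l with
        | nil =>
          have := hperm.symm.eq_nil
          simp at this
          simp [this] at hlenpos
        | cons p l'' =>
          have hpmem : p ∈ array.map pvPair := hperm.mem_iff.mp (by simp)
          rcases List.mem_iff_getElem.mp hpmem with ⟨k, hk, hpk⟩
          have hk' : k < array.length := by simpa using hk
          have hpk' : pvPair array[k] = p := by simpa using hpk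
          have hitem : array[k] ≠ "" := harr _ (List.getElem_mem hk')
          refine ⟨((0:Int) + k, array[k]), ?_, ?_⟩
          · exact (PySem.List.mem_enumerate_iff _ _ _).mpr ⟨k, hk', rfl⟩
          · simp only [Bool.and_eq_true]
            constructor
            · rw [hll, pv_first_some _ hitem]
              have : p.1 = lc := hwalk.1
              rw [show pvFirst array[k] = p.1 from congrArg Prod.fst hpk']
              simp [this]
            · rw [pv_slice_eraseIdx]
              apply (ih (array.eraseIdx k) (circle ++ [array[k]]) (pvLast array[k])
                (by rw [List.length_eraseIdx_of_lt hk']; omega)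
                (fun w hw => harr w (List.mem_of_mem_eraseIdx hw))
                (by simp)
                (by rw [pv_ff_append _ _ hcne]; exact hff)
                (by rw [pv_ll_append]; exact pv_last_some _ hitem)).mpr
              refine ⟨l'', ?_, ?_⟩
              · have h1 : l''.Perm ((array.map pvPair).erase p) := by
                  have h2 : (array.map pvPair).Perm (p :: (array.map pvPair).erase p) :=
                    List.perm_cons_erase hpmem
                  exact (hperm.trans h2).cons_inv
                have h3 : ((array.map pvPair).eraseIdx k).Perm ((array.map pvPair).erase p) := by
                  have hk2 : k < (array.map pvPair).length := by simpa using hk'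
                  have := pv_eraseIdx_perm (array.map pvPair) k hk2
                  rw [show (array.map pvPair)[k] = p from by simpa using hpk'] at this
                  exact this
                have hmaperase : (array.eraseIdx k).map pvPair = (array.map pvPair).eraseIdx k := by
                  simp [List.eraseIdx_map]
                rw [hmaperase]
                exact h1.trans h3.symm
              · have : p.2 = pvLast array[k] := (congrArg Prod.snd hpk').symm
                rw [← this]
                exact hwalk.2

theorem pvA_iff (w0 : String) (rest : List String) (h0 : w0 ≠ "")
    (hall : ∀ w ∈ rest, w ≠ "") :
    (make_words_curcle (w0 :: rest) = true ↔
      ∃ l, l.Perm (rest.map pvPair) ∧ pvWalk l (pvLast w0) (pvFirst w0)) := by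
  unfold make_words_curcle
  rw [PySem.List.pyGet?_zero_cons]
  simp only [PySem.List.slice_from_one, List.tail_cons, List.length_cons]
  exact pvHelperA_iff (pvFirst w0) (rest.length + 1) rest [w0] (pvLast w0)
    (by omega) hall (by simp)
    (by unfold pvFirstFirstA
        rw [PySem.List.pyGet?_zero_cons]
        exact pv_first_some w0 h0)
    (by unfold pvLastLastA
        rw [PySem.List.pyGet?_neg_one]
        simp only [List.getLast?_singleton, Option.bind_some]
        exact pv_last_some w0 h0)

-- B-side: the closure loop computes reachability
def pvStep1 (st : PySem.Set Char × Bool) (p : Char × Char) : PySem.Set Char × Bool :=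
  if (PySem.Set.contains st.1 p.1) != (PySem.Set.contains st.1 p.2)
  then (PySem.Set.add (PySem.Set.add st.1 p.1) p.2, true)
  else st

theorem pvStepB_eq (pairs : List (Char × Char)) (seen : PySem.Set Char) :
    pvStepB pairs seen = pairs.foldl pvStep1 (seen, false) := rfl

theorem pvXor_cases {s : PySem.Set Char} {a b : Char}
    (h : (PySem.Set.contains s a != PySem.Set.contains s b) = true) :
    (a ∈ s ∧ b ∉ s) ∨ (b ∈ s ∧ a ∉ s) := by
  cases h1 : PySem.Set.contains s a <;> cases h2 : PySem.Set.contains s b <;>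
      rw [h1, h2] at h <;> simp at h
  · refine Or.inr ⟨(PySem.Set.contains_iff s b).mp h2, fun hm => ?_⟩
    rw [(PySem.Set.contains_iff s a).mpr hm] at h1
    cases h1
  · refine Or.inl ⟨(PySem.Set.contains_iff s a).mp h1, fun hm => ?_⟩
    rw [(PySem.Set.contains_iff s b).mpr hm] at h2
    cases h2

theorem pvStep1_mem (st : PySem.Set Char × Bool) (p : Char × Char) (x : Char)
    (h : x ∈ st.1) : x ∈ (pvStep1 st p).1 := by
  unfold pvStep1
  split
  · simp only [PySem.Set.mem_add]
    exact Or.inl (Or.inl h)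
  · exact h

theorem pvStepB_mono (pairs : List (Char × Char)) :
    ∀ (st : PySem.Set Char × Bool) (x : Char), x ∈ st.1 →
      x ∈ (pairs.foldl pvStep1 st).1 := by
  induction pairs with
  | nil => intro st x h; exact h
  | cons q t ih => intro st x h; exact ih (pvStep1 st q) x (pvStep1_mem st q x h)

theorem pvStepB_len_mono (pairs : List (Char × Char)) :
    ∀ (st : PySem.Set Char × Bool), st.1.length ≤ (pairs.foldl pvStep1 st).1.length := by
  induction pairs with
  | nil => intro st; exact le_rfl
  | cons q t ih =>
    intro st
    simp only [List.foldl_cons]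
    refine le_trans ?_ (ih (pvStep1 st q))
    unfold pvStep1
    split
    · simp only
      rcases Bool.eq_false_or_eq_true (PySem.Set.contains st.1 q.2) with h2 | h2
      · have hq2 : q.2 ∉ PySem.Set.add st.1 q.1 ∨ q.2 ∈ PySem.Set.add st.1 q.1 := by
          tauto
        have hlen1 : st.1.length ≤ (PySem.Set.add st.1 q.1).length := by
          rw [PySem.Set.add_eq_ite]
          split <;> simp
        have hlen2 : (PySem.Set.add st.1 q.1).length ≤
            (PySem.Set.add (PySem.Set.add st.1 q.1) q.2).length := by
          rw [PySem.Set.add_eq_ite (s := PySem.Set.add st.1 q.1)]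
          split <;> simp
        omega
      · have hlen1 : st.1.length ≤ (PySem.Set.add st.1 q.1).length := by
          rw [PySem.Set.add_eq_ite]
          split <;> simp
        have hlen2 : (PySem.Set.add st.1 q.1).length ≤
            (PySem.Set.add (PySem.Set.add st.1 q.1) q.2).length := by
          rw [PySem.Set.add_eq_ite (s := PySem.Set.add st.1 q.1)]
          split <;> simp
        omega
    · exact le_rfl

theorem pvStepB_flag_true (pairs : List (Char × Char)) :
    ∀ (st : PySem.Set Char × Bool), st.2 = true → (pairs.foldl pvStep1 st).2 = true := by
  induction pairs with
  | nil => intro st h; exact h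
  | cons q t ih =>
    intro st h
    simp only [List.foldl_cons]
    apply ih
    unfold pvStep1
    split
    · rfl
    · exact h

theorem pvStepB_strict (pairs : List (Char × Char)) :
    ∀ (st : PySem.Set Char × Bool), st.2 = false →
      (pairs.foldl pvStep1 st).2 = true →
      st.1.length < (pairs.foldl pvStep1 st).1.length := by
  induction pairs with
  | nil =>
    intro st h1 h2
    rw [List.foldl_nil] at h2
    rw [h2] at h1
    cases h1
  | cons q t ih =>
    intro st h1 h2
    simp only [List.foldl_cons] at h2 ⊢
    by_cases hcond : (PySem.Set.contains st.1 q.1 != PySem.Set.contains st.1 q.2) = true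
    · have hq : pvStep1 st q = (PySem.Set.add (PySem.Set.add st.1 q.1) q.2, true) := by
        unfold pvStep1
        rw [if_pos hcond]
      have hone : (PySem.Set.add (PySem.Set.add st.1 q.1) q.2).length = st.1.length + 1 := by
        rcases pvXor_cases hcond with ⟨hm1, hm2⟩ | ⟨hm1, hm2⟩
        · rw [PySem.Set.add_of_mem hm1, PySem.Set.add_of_not_mem hm2]
          simp
        · rw [PySem.Set.add_of_not_mem hm2,
              PySem.Set.add_of_mem (by simp [hm1] : q.2 ∈ st.1 ++ [q.1])]
          simp
      have := pvStepB_len_mono t (pvStep1 st q)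
      rw [hq] at this ⊢
      simp only at this
      omega
    · have hq : pvStep1 st q = st := by
        unfold pvStep1
        rw [if_neg hcond]
      rw [hq] at h2 ⊢
      exact ih st h1 h2

theorem pvStepB_flag_mono (pairs : List (Char × Char)) (st : PySem.Set Char × Bool)
    (h : (pairs.foldl pvStep1 st).2 = false) : st.2 = false := by
  by_contra hc
  rw [pvStepB_flag_true pairs st (by revert hc; cases st.2 <;> simp)] at h
  cases h

theorem pvStepB_unchanged (pairs : List (Char × Char)) :
    ∀ (st : PySem.Set Char × Bool),
      (pairs.foldl pvStep1 st).2 = false →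
      (pairs.foldl pvStep1 st).1 = st.1 ∧
      ∀ p ∈ pairs, (p.1 ∈ st.1 ↔ p.2 ∈ st.1) := by
  induction pairs with
  | nil => intro st _; exact ⟨rfl, by simp⟩
  | cons q t ih =>
    intro st hfin
    have hstep : (pvStep1 st q).2 = false := pvStepB_flag_mono t (pvStep1 st q) hfin
    have hcond : ¬ ((PySem.Set.contains st.1 q.1) != (PySem.Set.contains st.1 q.2)) = true := by
      intro hc
      unfold pvStep1 at hstep
      rw [if_pos hc] at hstep
      simp at hstep
    have hq : pvStep1 st q = st := by
      unfold pvStep1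
      rw [if_neg hcond]
    rw [List.foldl_cons, hq] at hfin ⊢
    obtain ⟨h1, h2⟩ := ih st hfin
    refine ⟨h1, ?_⟩
    intro p hp
    rcases List.mem_cons.mp hp with h | h
    · subst h
      have hcond' : PySem.Set.contains st.1 p.1 = PySem.Set.contains st.1 p.2 := by
        simpa using hcond
      rw [← PySem.Set.contains_iff st.1 p.1, ← PySem.Set.contains_iff st.1 p.2, hcond']
    · exact h2 p h

theorem pvStepB_sound (E : List (Char × Char)) (s0 : Char) :
    ∀ (pairs : List (Char × Char)), (∀ p ∈ pairs, p ∈ E) →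
    ∀ (st : PySem.Set Char × Bool), (∀ c ∈ st.1, pvReach E s0 c) →
      ∀ c ∈ (pairs.foldl pvStep1 st).1, pvReach E s0 c := by
  intro pairs
  induction pairs with
  | nil => intro _ st h c hc; exact h c hc
  | cons q t ih =>
    intro hsub st hst
    apply ih (fun p hp => hsub p (by simp [hp]))
    intro c hc
    unfold pvStep1 at hc
    split at hc
    · rename_i hcond
      simp only [PySem.Set.mem_add] at hc
      have hqE : (q.1, q.2) ∈ E := hsub q (by simp)
      rcases hc with (hc | hc) | hc
      · exact hst c hc
      · subst hc
        rcases pvXor_cases hcond with ⟨h1, _⟩ | ⟨h1, _⟩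
        · exact hst q.1 h1
        · exact pvReach.step (hst q.2 h1) (Or.inr hqE)
      · subst hc
        rcases pvXor_cases hcond with ⟨h1, _⟩ | ⟨h1, _⟩
        · exact pvReach.step (hst q.1 h1) (Or.inl hqE)
        · exact hst q.2 h1
    · exact hst c hc

theorem pvStepB_elems (allowed : List Char) :
    ∀ (pairs : List (Char × Char)), (∀ p ∈ pairs, p.1 ∈ allowed ∧ p.2 ∈ allowed) →
    ∀ (st : PySem.Set Char × Bool), (∀ c ∈ st.1, c ∈ allowed) →
      ∀ c ∈ (pairs.foldl pvStep1 st).1, c ∈ allowed := by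
  intro pairs
  induction pairs with
  | nil => intro _ st h c hc; exact h c hc
  | cons q t ih =>
    intro hsub st hst
    apply ih (fun p hp => hsub p (by simp [hp]))
    intro c hc
    unfold pvStep1 at hc
    split at hc
    · simp only [PySem.Set.mem_add] at hc
      rcases hc with (hc | hc) | hc
      · exact hst c hc
      · exact hc ▸ (hsub q (by simp)).1
      · exact hc ▸ (hsub q (by simp)).2
    · exact hst c hc

theorem pvStepB_nodup (pairs : List (Char × Char)) :
    ∀ (st : PySem.Set Char × Bool), st.1.Nodup → (pairs.foldl pvStep1 st).1.Nodup := by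
  induction pairs with
  | nil => intro st h; exact h
  | cons q t ih =>
    intro st hst
    apply ih
    unfold pvStep1
    split
    · exact PySem.Set.nodup_add _ _ (PySem.Set.nodup_add _ _ hst)
    · exact hst

theorem pvLoopB_mono (pairs : List (Char × Char)) :
    ∀ (fuel : Nat) (seen : PySem.Set Char) (x : Char), x ∈ seen →
      x ∈ pvLoopB fuel pairs seen := by
  intro fuel
  induction fuel with
  | zero => intro seen x h; exact h
  | succ n ih =>
    intro seen x h
    show x ∈ (if (pvStepB pairs seen).2 then pvLoopB n pairs (pvStepB pairs seen).1
      else (pvStepB pairs seen).1)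
    have hx : x ∈ (pvStepB pairs seen).1 := by
      rw [pvStepB_eq]
      exact pvStepB_mono pairs (seen, false) x h
    split
    · exact ih _ x hx
    · exact hx

theorem pvLoopB_sound (pairs E : List (Char × Char)) (s0 : Char)
    (hsub : ∀ p ∈ pairs, p ∈ E) :
    ∀ (fuel : Nat) (seen : PySem.Set Char), (∀ c ∈ seen, pvReach E s0 c) →
      ∀ c ∈ pvLoopB fuel pairs seen, pvReach E s0 c := by
  intro fuel
  induction fuel with
  | zero => intro seen h c hc; exact h c hc
  | succ n ih =>
    intro seen h c hc
    have hsound : ∀ c ∈ (pvStepB pairs seen).1, pvReach E s0 c := by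
      rw [pvStepB_eq]
      exact pvStepB_sound E s0 pairs hsub (seen, false) h
    rw [show pvLoopB (n+1) pairs seen = (if (pvStepB pairs seen).2 then
        pvLoopB n pairs (pvStepB pairs seen).1 else (pvStepB pairs seen).1) from rfl] at hc
    split at hc
    · exact ih _ hsound c hc
    · exact hsound c hc

theorem pvLoopB_closed (pairs : List (Char × Char)) (allowed : List Char)
    (_hand : allowed.Nodup) (hpa : ∀ p ∈ pairs, p.1 ∈ allowed ∧ p.2 ∈ allowed) :
    ∀ (fuel : Nat) (seen : PySem.Set Char), seen.Nodup → (∀ c ∈ seen, c ∈ allowed) →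
      allowed.length ≤ fuel + seen.length →
      ∀ p ∈ pairs, (p.1 ∈ pvLoopB fuel pairs seen ↔ p.2 ∈ pvLoopB fuel pairs seen) := by
  intro fuel
  induction fuel with
  | zero =>
    intro seen hnd hsubal hlen p hp
    have hsp : seen.Subperm allowed := hnd.subperm hsubal
    have hperm : seen.Perm allowed := hsp.perm_of_length_le (by simpa using hlen)
    show p.1 ∈ seen ↔ p.2 ∈ seen
    rw [hperm.mem_iff, hperm.mem_iff]
    simp [(hpa p hp).1, (hpa p hp).2]
  | succ n ih =>
    intro seen hnd hsubal hlen p hp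
    rw [show pvLoopB (n+1) pairs seen = (if (pvStepB pairs seen).2 then
        pvLoopB n pairs (pvStepB pairs seen).1 else (pvStepB pairs seen).1) from rfl]
    split
    · rename_i hflag
      apply ih (pvStepB pairs seen).1
      · rw [pvStepB_eq]; exact pvStepB_nodup pairs (seen, false) hnd
      · rw [pvStepB_eq]; exact pvStepB_elems allowed pairs hpa (seen, false) hsubal
      · have := pvStepB_strict pairs (seen, false) rfl (by rw [← pvStepB_eq]; exact hflag)
        rw [← pvStepB_eq] at this
        simp only at this
        omega
      · exact hp
    · rename_i hflag
      have h2 := (pvStepB_unchanged pairs (seen, false) (by rw [← pvStepB_eq]; simpa using hflag)).2 p hp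
      have h1 := (pvStepB_unchanged pairs (seen, false) (by rw [← pvStepB_eq]; simpa using hflag)).1
      rw [pvStepB_eq, h1]
      exact h2
theorem pvReach_complete (pairs : List (Char × Char)) (seen : PySem.Set Char) (s0 : Char)
    (hs0 : s0 ∈ seen) (hclosed : ∀ p ∈ pairs, (p.1 ∈ seen ↔ p.2 ∈ seen)) :
    ∀ c, pvReach pairs s0 c → c ∈ seen := by
  intro c h
  induction h with
  | base => exact hs0
  | @step a b _ he ih =>
    rcases he with he | he
    · exact (hclosed (a, b) he).mp ih
    · exact (hclosed (b, a) he).mpr ih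

theorem pvB_iff (w0 : String) (rest : List String) :
    (make_words_curcle_alt (w0 :: rest) = true ↔
      (pvBal ((w0 :: rest).map pvPair) ∧
        ∀ p ∈ (w0 :: rest).map pvPair,
          pvReach ((w0 :: rest).map pvPair) (pvFirst w0) p.1)) := by
  unfold make_words_curcle_alt
  simp only []
  set wl := w0 :: rest with hwl
  set E := wl.map pvPair with hE
  have hfst : wl.map pvFirst = E.map Prod.fst := by
    rw [hE, List.map_map]; rfl
  have hsnd : wl.map pvLast = E.map Prod.snd := by
    rw [hE, List.map_map]; rfl
  have hzip : (wl.map pvFirst).zip (wl.map pvLast) = E := by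
    rw [hE, List.zip_map']
    simp [pvPair]
  by_cases hbal : PySem.List.sorted (wl.map pvFirst) (fun x => x) false =
      PySem.List.sorted (wl.map pvLast) (fun x => x) false
  · rw [if_neg (by simp [hbal])]
    have hbal' : pvBal E := by
      rw [pvBal, ← hfst, ← hsnd]
      exact (PySem.List.sorted_id_eq_sorted_id_iff_perm _ _).mp hbal
    -- the match reduces: wl.map pvFirst = pvFirst w0 :: rest.map pvFirst
    rw [show wl.map pvFirst = pvFirst w0 :: rest.map pvFirst from rfl]
    set s0 := pvFirst w0 with hs0
    set seen := pvLoopB (2 * wl.length + 1) ((pvFirst w0 :: rest.map pvFirst).zip (wl.map pvLast))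
      (PySem.Set.add PySem.Set.empty s0) with hseen
    have hseenE : seen = pvLoopB (2 * wl.length + 1) E [s0] := by
      rw [hseen, show (pvFirst w0 :: rest.map pvFirst).zip (wl.map pvLast) = E from hzip]
      rfl
    have hinit_mem : ∀ c ∈ ([s0] : List Char), pvReach E s0 c := by
      intro c hc
      rw [List.mem_singleton] at hc
      subst hc
      exact pvReach.base
    have hsound : ∀ c ∈ seen, pvReach E s0 c := by
      rw [hseenE]
      exact pvLoopB_sound E E s0 (fun p hp => hp) _ [s0] hinit_mem
    have hs0seen : s0 ∈ seen := by
      rw [hseenE]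
      exact pvLoopB_mono E _ [s0] s0 (by simp)
    -- the allowed universe
    have hclosed : ∀ p ∈ E, (p.1 ∈ seen ↔ p.2 ∈ seen) := by
      rw [hseenE]
      apply pvLoopB_closed E (PySem.List.dedup (s0 :: (E.map Prod.fst ++ E.map Prod.snd)))
        (by rw [PySem.List.dedup_eq_ofList]; exact PySem.Set.nodup_ofList _)
        (by intro p hp
            constructor
            · rw [PySem.List.mem_dedup]
              exact List.mem_cons_of_mem _ (List.mem_append_left _ (List.mem_map_of_mem hp))
            · rw [PySem.List.mem_dedup]
              exact List.mem_cons_of_mem _ (List.mem_append_right _ (List.mem_map_of_mem hp)))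
        (2 * wl.length + 1) [s0] (by simp) (by simp)
      have h1 : (PySem.List.dedup (s0 :: (E.map Prod.fst ++ E.map Prod.snd))).length ≤
          (s0 :: (E.map Prod.fst ++ E.map Prod.snd)).length := by
        rw [PySem.List.dedup_eq_ofList]
        exact PySem.Set.length_ofList_le _
      have h2 : (s0 :: (E.map Prod.fst ++ E.map Prod.snd)).length = 2 * wl.length + 1 := by
        simp [hE]
        omega
      simp only [List.length_singleton]
      omega
    have hcomplete : ∀ c, pvReach E s0 c → c ∈ seen :=
      pvReach_complete E seen s0 hs0seen hclosed
    constructor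
    · intro hall
      refine ⟨hbal', ?_⟩
      intro p hp
      rw [List.all_eq_true] at hall
      have hmem : p.1 ∈ pvFirst w0 :: rest.map pvFirst := by
        rw [show pvFirst w0 :: rest.map pvFirst = wl.map pvFirst from rfl, hfst]
        exact List.mem_map_of_mem hp
      have := hall p.1 hmem
      exact hsound p.1 ((PySem.Set.contains_iff seen p.1).mp this)
    · rintro ⟨_, hconn⟩
      rw [List.all_eq_true]
      intro c hc
      rw [show pvFirst w0 :: rest.map pvFirst = wl.map pvFirst from rfl, hfst] at hc
      obtain ⟨p, hpE, hpc⟩ := List.exists_of_mem_map hc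
      rw [PySem.Set.contains_iff seen c]
      exact hpc ▸ hcomplete p.1 (hconn p hpE)
  · rw [if_pos (by simp [hbal])]
    constructor
    · intro h; cases h
    · rintro ⟨hb, _⟩
      exfalso
      apply hbal
      rw [PySem.List.sorted_id_eq_sorted_id_iff_perm, hfst, hsnd]
      exact hb
-- ===== VERDICT (by name: the statement is the Claim_ definition above) =====
theorem make_words_curcle_spec : Claim_equal_make_words_curcle := by
  intro words_list _ hpre
  obtain ⟨hne, hall⟩ := hpre
  unfold Spec_make_words_curcle
  cases words_list with
  | nil => exact absurd rfl hne
  | cons w0 rest =>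
    have h0 : w0 ≠ "" := hall w0 (by simp)
    have hr : ∀ w ∈ rest, w ≠ "" := fun w hw => hall w (by simp [hw])
    rw [Bool.eq_iff_iff, pvA_iff w0 rest h0 hr, pvB_iff w0 rest]
    exact (pvEuler (pvPair w0) (rest.map pvPair)).symm
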